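-- pv_equiv track=rewrite | github.com/tien0246/writeup | 2025/x3ctf/oh-my-gadt.py | reverse_t1
-- ===== SOURCE A (Python) =====
-- def reverse_t1(bytes_list):
--     chunk_size = 4
--     chunks = [bytes_list[i:i+chunk_size] for i in range(0, len(bytes_list), chunk_size)]
--     original_chunks = []
--     for i, chunk in enumerate(chunks):
--         if len(chunk) < chunk_size:
--             original_chunks.append(chunk)
--             continue
--         rotate_by = i % chunk_size
--         rotated = chunk[-rotate_by:] + chunk[:-rotate_by] if rotate_by != 0 else chunk
--         original_chunks.append(rotated)
--     original = []
--     for chunk in original_chunks: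
--         original.extend(chunk)
--     return original
-- ===== SOURCE B (Python) =====
-- def reverse_t1(bytes_list):
--     n = len(bytes_list)
--     out = []
--     for p in range(n):
--         c = p // 4
--         if c * 4 + 4 <= n:
--             out.append(bytes_list[c * 4 + (p % 4 - c % 4) % 4])
--         else:
--             out.append(bytes_list[p])
--     return out
-- ===== Notes on version B (the rewrite author's own statement) =====
-- stated objective: alternative
-- what changed: B computes each output byte directly by index arithmetic ((p%4 - (p//4)%4) % 4 within each full 4-chunk, identity on a short tail) in a single pass, instead of building the chunk list, rotating each chunk via slice concatenation and flattening.
import Mathlib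
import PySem

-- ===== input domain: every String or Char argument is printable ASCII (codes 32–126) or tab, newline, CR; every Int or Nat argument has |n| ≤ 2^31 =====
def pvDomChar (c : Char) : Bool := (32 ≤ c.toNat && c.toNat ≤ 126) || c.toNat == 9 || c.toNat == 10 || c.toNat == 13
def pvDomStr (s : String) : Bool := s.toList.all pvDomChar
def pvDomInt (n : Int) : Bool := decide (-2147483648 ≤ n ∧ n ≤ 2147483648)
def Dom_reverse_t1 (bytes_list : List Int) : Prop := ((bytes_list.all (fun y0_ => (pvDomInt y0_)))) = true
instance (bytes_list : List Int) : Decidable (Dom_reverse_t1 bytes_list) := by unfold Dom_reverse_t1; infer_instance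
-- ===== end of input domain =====

-- B un-rotates each 4-byte chunk by pure index arithmetic in one pass, instead of
-- building the chunk list, rotating each chunk by slice concatenation and flattening
-- (alternative decomposition; same exact output).

-- ===== PORT A =====
def reverse_t1 (bytes_list : List Int) : List Int :=
  let chunk_size : Int := 4
  let chunks : List (List Int) :=
    (PySem.List.pyRange 0 (PySem.List.len bytes_list) chunk_size).map
      (fun i => PySem.List.slice bytes_list (some i) (some (i + chunk_size)))
  let original_chunks : List (List Int) :=
    (PySem.List.enumerate chunks 0).foldl
      (fun acc ic =>
        if PySem.List.len ic.2 < chunk_size then acc ++ [ic.2]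
        else
          let rotate_by := PySem.Int.mod ic.1 chunk_size
          let rotated :=
            if rotate_by ≠ 0 then
              PySem.List.slice ic.2 (some (-rotate_by)) none ++
                PySem.List.slice ic.2 none (some (-rotate_by))
            else ic.2
          acc ++ [rotated]) []
  original_chunks.foldl (fun acc chunk => acc ++ chunk) []

-- ===== PORT B =====
def reverse_t1_alt (bytes_list : List Int) : List Int :=
  let n : Int := PySem.List.len bytes_list
  (PySem.List.pyRange 0 n 1).foldl
    (fun out p =>
      let c := PySem.Int.floordiv p 4
      if c * 4 + 4 ≤ n then
        out ++ [PySem.List.pyGetD bytes_list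
          (c * 4 + PySem.Int.mod (PySem.Int.mod p 4 - PySem.Int.mod c 4) 4) 0]
      else
        out ++ [PySem.List.pyGetD bytes_list p 0]) []

-- ===== PRECONDITION & SPEC =====
def Spec_reverse_t1 (bytes_list : List Int) (out : List Int) : Prop := out = reverse_t1_alt bytes_list
instance (bytes_list : List Int) (out : List Int) : Decidable (Spec_reverse_t1 bytes_list out) := by unfold Spec_reverse_t1; infer_instance

-- ===== CLAIM (what is proved, stated in full; the proofs are below) =====
def Claim_equal_reverse_t1 : Prop := ∀ (bytes_list : List Int), Dom_reverse_t1 bytes_list → Spec_reverse_t1 bytes_list (reverse_t1 bytes_list)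

-- ===== LEMMAS AND PROOFS =====

-- right-rotation of a 4-element chunk number c (the common form both proofs reduce to)
def pvRotc (c : Nat) (xs : List Int) : List Int :=
  xs.drop (4 - c % 4) ++ xs.take (4 - c % 4)

-- the common specification: rotate each full 4-chunk by its index, keep a short tail
def pvSpec : Nat → List Int → List Int
  | c, a :: b :: x :: y :: rest => pvRotc c [a, b, x, y] ++ pvSpec (c + 1) rest
  | _, l => l

-- structural form of A's chunk list
def pvChunks : List Int → List (List Int)
  | a :: b :: x :: y :: rest => [a, b, x, y] :: pvChunks rest
  | [] => []
  | l => [l]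

-- the per-chunk body of A's loop
def pvRotFn (ic : Int × List Int) : List Int :=
  if PySem.List.len ic.2 < 4 then ic.2
  else
    let r := PySem.Int.mod ic.1 4
    if r ≠ 0 then
      PySem.List.slice ic.2 (some (-r)) none ++ PySem.List.slice ic.2 none (some (-r))
    else ic.2

-- B's per-index formula, in Nat arithmetic, generalized over the starting chunk index c0
def pvG (c0 : Nat) (l : List Int) (k : Nat) : Int :=
  let c := k / 4
  if c * 4 + 4 ≤ l.length then l.getD (c * 4 + (k % 4 + 4 - (c + c0) % 4) % 4) 0
  else l.getD k 0

-- step-4 pyRange induction forms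
lemma pyRange4_nil {a b : Int} (h : b ≤ a) : PySem.List.pyRange a b 4 = [] := by
  rw [PySem.List.pyRange_of_pos a b (by norm_num)]
  simp [show ¬ a < b by omega]

lemma pyRange4_cons {a b : Int} (h : a < b) :
    PySem.List.pyRange a b 4 = a :: PySem.List.pyRange (a + 4) b 4 := by
  rw [PySem.List.pyRange_of_pos a b (by norm_num), PySem.List.pyRange_of_pos (a + 4) b (by norm_num)]
  by_cases h4 : a + 4 < b
  · have hc : ((b - a + 4 - 1) / 4).toNat = ((b - (a + 4) + 4 - 1) / 4).toNat + 1 := by omega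
    rw [if_pos h, if_pos h4, hc, List.range_succ_eq_map]
    simp [List.map_map, Function.comp]
    intro k _
    ring
  · have hc : ((b - a + 4 - 1) / 4).toNat = 1 := by omega
    rw [if_pos h, if_neg h4, hc]
    simp

lemma pyRange4_shift (a b : Int) :
    PySem.List.pyRange (a + 4) (b + 4) 4 = (PySem.List.pyRange a b 4).map (· + 4) := by
  by_cases hab : a < b
  · rw [PySem.List.pyRange_of_pos a b (by norm_num), PySem.List.pyRange_of_pos (a + 4) (b + 4) (by norm_num),
      if_pos hab, if_pos (show a + 4 < b + 4 by omega),
      show (b + 4 - (a + 4) + 4 - 1) / 4 = (b - a + 4 - 1) / 4 by congr 1; ring, List.map_map]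
    apply List.map_congr_left
    intro k _
    simp [Function.comp]
    ring
  · rw [pyRange4_nil (by omega), pyRange4_nil (by omega)]
    rfl

lemma chunksA_aux : ∀ (n : Nat) (l : List Int), l.length ≤ n →
    (PySem.List.pyRange 0 (PySem.List.len l) 4).map
      (fun i => PySem.List.slice l (some i) (some (i + 4))) = pvChunks l := by
  intro n
  induction n with
  | zero =>
    intro l hl
    have : l = [] := by cases l <;> simp_all
    subst this
    rw [show PySem.List.len ([] : List Int) = 0 by simp, pyRange4_nil le_rfl]
    rfl
  | succ n ih =>
    intro l hl
    match l with
    | [] =>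
      rw [show PySem.List.len ([] : List Int) = 0 by simp, pyRange4_nil le_rfl]
      rfl
    | [a] =>
      rw [show PySem.List.len [a] = 1 by simp, pyRange4_cons (by norm_num), pyRange4_nil (by norm_num)]
      simp [pvChunks]
      rw [PySem.List.slice_to [a] (by norm_num : (0:Int) ≤ 4)]
      rfl
    | [a, b] =>
      rw [show PySem.List.len [a, b] = 2 by simp, pyRange4_cons (by norm_num), pyRange4_nil (by norm_num)]
      simp [pvChunks]
      rw [PySem.List.slice_to [a, b] (by norm_num : (0:Int) ≤ 4)]
      rfl
    | [a, b, x] =>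
      rw [show PySem.List.len [a, b, x] = 3 by simp, pyRange4_cons (by norm_num), pyRange4_nil (by norm_num)]
      simp [pvChunks]
      rw [PySem.List.slice_to [a, b, x] (by norm_num : (0:Int) ≤ 4)]
      rfl
    | a :: b :: x :: y :: rest =>
      have hlen : PySem.List.len (a :: b :: x :: y :: rest) = (rest.length : Int) + 4 := by
        simp [PySem.List.len_eq]; ring
      rw [hlen, pyRange4_cons (by positivity), show ((0:Int) + 4) = 0 + 4 from rfl, pyRange4_shift 0 (rest.length : Int)]
      rw [List.map_cons, List.map_map]
      have hhead : PySem.List.slice (a :: b :: x :: y :: rest) (some 0) (some (0 + 4)) = [a, b, x, y] := by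
        rw [PySem.List.slice_toNat _ (by norm_num) (by norm_num)]
        rfl
      have htail : ((PySem.List.pyRange 0 (rest.length : Int) 4).map
          ((fun i => PySem.List.slice (a :: b :: x :: y :: rest) (some i) (some (i + 4))) ∘ (· + 4))) =
          (PySem.List.pyRange 0 (rest.length : Int) 4).map
            (fun i => PySem.List.slice rest (some i) (some (i + 4))) := by
        apply List.map_congr_left
        intro i hi
        have h0 : 0 ≤ i := ((PySem.List.mem_pyRange_iff_of_pos (by norm_num) i).1 hi).1
        simp only [Function.comp]
        rw [PySem.List.slice_toNat _ (by omega) (by omega), PySem.List.slice_toNat _ (by omega) (by omega)]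
        have e1 : (i + 4).toNat = i.toNat + 4 := by omega
        have e2 : (i + 4 + 4).toNat = i.toNat + 4 + 4 := by omega
        rw [e1, e2]
        have hdrop : List.drop (i.toNat + 4) (a :: b :: x :: y :: rest) = List.drop i.toNat rest := by
          rw [Nat.add_comm, ← List.drop_drop]
          rfl
        rw [hdrop, show i.toNat + 4 + 4 - (i.toNat + 4) = 4 by omega, show i.toNat + 4 - i.toNat = 4 by omega]
      rw [hhead, htail, show ((rest.length : Int)) = PySem.List.len rest by simp,
        ih rest (by simp at hl; omega)]
      rfl

lemma chunksA (l : List Int) :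
    (PySem.List.pyRange 0 (PySem.List.len l) 4).map
      (fun i => PySem.List.slice l (some i) (some (i + 4))) = pvChunks l :=
  chunksA_aux l.length l le_rfl

lemma rotFn_eq (c : Nat) (a b x y : Int) :
    pvRotFn ((c : Int), [a, b, x, y]) = pvRotc c [a, b, x, y] := by
  unfold pvRotFn pvRotc
  have hm : PySem.Int.mod (c : Int) 4 = ((c % 4 : Nat) : Int) := by
    exact_mod_cast PySem.Int.mod_natCast c 4
  simp only [hm]
  have h4 : c % 4 = 0 ∨ c % 4 = 1 ∨ c % 4 = 2 ∨ c % 4 = 3 := by omega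
  rcases h4 with h | h | h | h <;> rw [h] <;> norm_num <;> rfl

lemma A_flat : ∀ (l : List Int),
    reverse_t1 l = ((PySem.List.enumerate (pvChunks l) 0).map pvRotFn).flatMap id := by
  intro l
  show ((PySem.List.enumerate ((PySem.List.pyRange 0 (PySem.List.len l) 4).map
      (fun i => PySem.List.slice l (some i) (some (i + 4)))) 0).foldl
      (fun acc ic =>
        if PySem.List.len ic.2 < 4 then acc ++ [ic.2]
        else
          let rotate_by := PySem.Int.mod ic.1 4
          let rotated :=
            if rotate_by ≠ 0 then
              PySem.List.slice ic.2 (some (-rotate_by)) none ++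
                PySem.List.slice ic.2 none (some (-rotate_by))
            else ic.2
          acc ++ [rotated]) []).foldl (fun acc chunk => acc ++ chunk) [] = _
  rw [chunksA]
  have hbody : (fun (acc : List (List Int)) (ic : Int × List Int) =>
      if PySem.List.len ic.2 < 4 then acc ++ [ic.2]
      else
        let rotate_by := PySem.Int.mod ic.1 4
        let rotated :=
          if rotate_by ≠ 0 then
            PySem.List.slice ic.2 (some (-rotate_by)) none ++
              PySem.List.slice ic.2 none (some (-rotate_by))
          else ic.2
        acc ++ [rotated]) = fun acc ic => acc ++ [pvRotFn ic] := by
    funext acc ic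
    by_cases h : PySem.List.len ic.2 < 4
    · simp only [pvRotFn, if_pos h]
    · simp only [pvRotFn, if_neg h]
  rw [hbody, PySem.List.foldl_append_singleton_eq_map,
    PySem.List.foldl_append_eq_flatMap (fun c : List Int => c)]
  rfl

lemma A_aux : ∀ (n : Nat) (l : List Int), l.length ≤ n → ∀ (c : Nat),
    ((PySem.List.enumerate (pvChunks l) (c : Int)).map pvRotFn).flatMap id = pvSpec c l := by
  intro n
  induction n with
  | zero =>
    intro l hl c
    have : l = [] := by cases l <;> simp_all
    subst this
    rfl
  | succ n ih =>
    intro l hl c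
    match l with
    | [] => rfl
    | [a] =>
      show ((PySem.List.enumerate [[a]] (c : Int)).map pvRotFn).flatMap id = pvSpec c [a]
      rw [PySem.List.enumerate_cons, PySem.List.enumerate_nil]
      simp [pvRotFn, pvSpec]
    | [a, b] =>
      show ((PySem.List.enumerate [[a, b]] (c : Int)).map pvRotFn).flatMap id = pvSpec c [a, b]
      rw [PySem.List.enumerate_cons, PySem.List.enumerate_nil]
      simp [pvRotFn, pvSpec]
    | [a, b, x] =>
      show ((PySem.List.enumerate [[a, b, x]] (c : Int)).map pvRotFn).flatMap id = pvSpec c [a, b, x]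
      rw [PySem.List.enumerate_cons, PySem.List.enumerate_nil]
      simp [pvRotFn, pvSpec]
    | a :: b :: x :: y :: rest =>
      show ((PySem.List.enumerate ([a, b, x, y] :: pvChunks rest) (c : Int)).map pvRotFn).flatMap id
          = pvSpec c (a :: b :: x :: y :: rest)
      rw [PySem.List.enumerate_cons, List.map_cons, List.flatMap_cons, rotFn_eq,
        show ((c : Int) + 1) = ((c + 1 : Nat) : Int) by push_cast; ring,
        ih rest (by simp at hl; omega) (c + 1)]
      rfl

lemma A_spec_from (l : List Int) (c : Nat) :
    ((PySem.List.enumerate (pvChunks l) (c : Int)).map pvRotFn).flatMap id = pvSpec c l :=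
  A_aux l.length l le_rfl c

lemma B_map : ∀ (l : List Int),
    reverse_t1_alt l = (List.range l.length).map (pvG 0 l) := by
  intro l
  show (PySem.List.pyRange 0 (PySem.List.len l) 1).foldl
    (fun out p =>
      let c := PySem.Int.floordiv p 4
      if c * 4 + 4 ≤ PySem.List.len l then
        out ++ [PySem.List.pyGetD l
          (c * 4 + PySem.Int.mod (PySem.Int.mod p 4 - PySem.Int.mod c 4) 4) 0]
      else
        out ++ [PySem.List.pyGetD l p 0]) [] = _
  have hbody : (fun (out : List Int) (p : Int) =>
      let c := PySem.Int.floordiv p 4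
      if c * 4 + 4 ≤ PySem.List.len l then
        out ++ [PySem.List.pyGetD l
          (c * 4 + PySem.Int.mod (PySem.Int.mod p 4 - PySem.Int.mod c 4) 4) 0]
      else
        out ++ [PySem.List.pyGetD l p 0]) = fun out p => out ++
          [if PySem.Int.floordiv p 4 * 4 + 4 ≤ PySem.List.len l then
            PySem.List.pyGetD l (PySem.Int.floordiv p 4 * 4 +
              PySem.Int.mod (PySem.Int.mod p 4 - PySem.Int.mod (PySem.Int.floordiv p 4) 4) 4) 0
          else PySem.List.pyGetD l p 0] := by
    funext out p
    by_cases h : PySem.Int.floordiv p 4 * 4 + 4 ≤ PySem.List.len l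
    · simp only [if_pos h]
    · simp only [if_neg h]
  rw [hbody, PySem.List.foldl_append_singleton_eq_map,
    show PySem.List.len l = (l.length : Int) by simp, PySem.List.pyRange_zero_nat, List.map_map]
  apply List.map_congr_left
  intro k _
  simp only [Function.comp]
  have hdiv : PySem.Int.floordiv (k : Int) 4 = ((k / 4 : Nat) : Int) := by
    rw [PySem.Int.floordiv_eq_ediv_of_pos (by norm_num)]
    omega
  rw [hdiv]
  by_cases hc : (k / 4) * 4 + 4 ≤ l.length
  · rw [if_pos (by exact_mod_cast hc)]
    have hidx : ((k / 4 : Nat) : Int) * 4 +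
        PySem.Int.mod (PySem.Int.mod (k : Int) 4 - PySem.Int.mod ((k / 4 : Nat) : Int) 4) 4 =
        (((k / 4) * 4 + (k % 4 + 4 - (k / 4 + 0) % 4) % 4 : Nat) : Int) := by
      simp only [PySem.Int.mod_eq_emod_of_pos (by norm_num : (0:Int) < 4)]
      push_cast
      omega
    rw [hidx, PySem.List.pyGetD_natCast]
    simp [pvG, hc]
  · rw [if_neg (by exact_mod_cast hc), PySem.List.pyGetD_natCast]
    simp [pvG, hc]

lemma pvG_shift (c0 : Nat) (a b x y : Int) (rest : List Int) (k : Nat) :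
    pvG c0 (a :: b :: x :: y :: rest) (4 + k) = pvG (c0 + 1) rest k := by
  unfold pvG
  rw [show (4 + k) / 4 = k / 4 + 1 by omega]
  have hgd : ∀ m, (a :: b :: x :: y :: rest).getD (4 + m) 0 = rest.getD m 0 := by
    intro m
    rw [show 4 + m = m + 4 by omega]
    rfl
  by_cases hc : (k / 4) * 4 + 4 ≤ rest.length
  · rw [if_pos (by simp; omega), if_pos hc,
      show (k / 4 + 1) * 4 + ((4 + k) % 4 + 4 - (k / 4 + 1 + c0) % 4) % 4 =
        4 + ((k / 4) * 4 + (k % 4 + 4 - (k / 4 + (c0 + 1)) % 4) % 4) by omega,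
      hgd]
  · rw [if_neg (by simp; omega), if_neg hc, hgd]

lemma B_aux : ∀ (n : Nat) (l : List Int), l.length ≤ n → ∀ (c0 : Nat),
    (List.range l.length).map (pvG c0 l) = pvSpec c0 l := by
  intro n
  induction n with
  | zero =>
    intro l hl c0
    have : l = [] := by cases l <;> simp_all
    subst this
    rfl
  | succ n ih =>
    intro l hl c0
    match l with
    | [] => rfl
    | [a] => simp [pvG, pvSpec, List.range_succ]
    | [a, b] => simp [pvG, pvSpec, List.range_succ]
    | [a, b, x] => simp [pvG, pvSpec, List.range_succ]
    | a :: b :: x :: y :: rest =>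
      rw [show (a :: b :: x :: y :: rest).length = 4 + rest.length by simp; omega,
        List.range_add, List.map_append, List.map_map]
      have h4 : c0 % 4 = 0 ∨ c0 % 4 = 1 ∨ c0 % 4 = 2 ∨ c0 % 4 = 3 := by omega
      have hfirst : (List.range 4).map (pvG c0 (a :: b :: x :: y :: rest)) = pvRotc c0 [a, b, x, y] := by
        rcases h4 with h | h | h | h <;>
          simp [pvG, pvRotc, List.range_succ, h]
      have hsecond : (List.range rest.length).map
          (pvG c0 (a :: b :: x :: y :: rest) ∘ (fun i => 4 + i)) =
          (List.range rest.length).map (pvG (c0 + 1) rest) := by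
        apply List.map_congr_left
        intro k _
        simp only [Function.comp]
        exact pvG_shift c0 a b x y rest k
      rw [hfirst, hsecond, ih rest (by simp at hl; omega) (c0 + 1)]
      rfl

lemma B_spec_from : ∀ (l : List Int) (c0 : Nat),
    (List.range l.length).map (pvG c0 l) = pvSpec c0 l := fun l =>
  B_aux l.length l le_rfl

-- ===== VERDICT (by name: the statement is the Claim_ definition above) =====
theorem reverse_t1_spec : Claim_equal_reverse_t1 := by
  intro l _
  unfold Spec_reverse_t1
  rw [A_flat, B_map, B_spec_from l 0]
  exact_mod_cast A_spec_from l 0
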